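-- pv_equiv track=rewrite | github.com/hangeulisbest/samsung_algorithm | 활주로_건설.py | check
-- ===== SOURCE A (Python) =====
-- def check(arr,x):
--     tmp,cnt = arr[0],1
--     cntlist=[]
--     for i in range(1,len(arr)):
--         if arr[i]!=tmp:
--             if abs(arr[i]-tmp)>1:
--                 return False
--             cntlist.append(cnt)
--             cnt=1
--             if arr[i]-tmp < 0:
--                 cntlist.append('D')
--             else:
--                 cntlist.append('U')
--         else:
--             cnt+=1
--         tmp = arr[i]
--     else:
--         cntlist.append(cnt)
--     for i in range(len(cntlist)):
--         if cntlist[i]=='D':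
--             if cntlist[i+1] < x:
--                 return False
--             cntlist[i+1]-=x
--         elif cntlist[i]=='U':
--             if cntlist[i-1] < x:
--                 return False
--             cntlist[i-1]-=x
--
--     return True
-- ===== SOURCE B (Python) =====
-- def check(arr, x):
--     # One streaming pass over the raw heights with O(1) extra state: c is the
--     # usable length of the current flat run (it goes below zero while a
--     # descending ramp still owes cells); no run-length list is materialised.
--     c = 1
--     for i in range(1, len(arr)):
--         d = arr[i] - arr[i - 1]
--         if d == 0:
--             c += 1
--         elif d == 1:
--             if c < x:
--                 return False
--             c = 1
--         elif d == -1: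
--             if c < 0:
--                 return False
--             c = 1 - x
--         else:
--             return False
--     return c >= 0
-- ===== Notes on version B (the rewrite author's own statement) =====
-- stated objective: alternative
-- what changed: Replaces A's two staged passes over a materialised mixed-type list (run-length encoding with 'U'/'D' string sentinels, then an index/mutation walk over it) by a single streaming pass over the raw heights that keeps only one integer c, the usable length of the current run, which goes negative while a descent ramp still owes cells and is validated at the next boundary or at the end.
import Mathlib
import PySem

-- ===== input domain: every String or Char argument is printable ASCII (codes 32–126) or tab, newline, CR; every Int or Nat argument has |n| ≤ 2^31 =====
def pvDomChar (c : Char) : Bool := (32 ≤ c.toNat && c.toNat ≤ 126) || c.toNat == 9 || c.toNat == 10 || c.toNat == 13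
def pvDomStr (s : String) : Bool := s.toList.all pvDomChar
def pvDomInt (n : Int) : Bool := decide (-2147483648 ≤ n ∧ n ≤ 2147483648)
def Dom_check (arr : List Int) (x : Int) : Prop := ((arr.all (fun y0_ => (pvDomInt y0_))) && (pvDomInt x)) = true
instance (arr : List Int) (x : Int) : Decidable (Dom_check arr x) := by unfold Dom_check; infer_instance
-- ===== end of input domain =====

-- B replaces A's two staged passes over a materialised mixed-type list (run-length counts
-- interleaved with 'U'/'D' string sentinels, then an index/mutation walk over that list) by a
-- single streaming pass over the raw heights keeping one integer of state (objective: alternative).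

-- ===== PORT A =====
-- cntlist holds ints and the string markers 'D'/'U'; modelled by this mixed-type cell.
inductive Cell
  | num : Int → Cell
  | U : Cell
  | D : Cell
deriving DecidableEq, Repr

-- first loop of A: state (tmp, cnt, cntlist); none = early `return False`
def checkLoop1 : List Int → Int → Int → List Cell → Option (List Cell)
  | [], _, cnt, cl => some (cl ++ [Cell.num cnt])
  | a :: rest, tmp, cnt, cl =>
    if a ≠ tmp then
      if (a - tmp).natAbs > 1 then none
      else
        checkLoop1 rest a 1
          ((cl ++ [Cell.num cnt]) ++ [if a - tmp < 0 then Cell.D else Cell.U])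
    else checkLoop1 rest a (cnt + 1) cl

-- second loop of A: fuel = remaining iterations of `for i in range(len(cntlist))`,
-- i the Python index, cl the (mutated) cntlist.  The `false` fallback arms are unreachable on
-- lists produced by checkLoop1 (cntlist starts and ends with a number and alternates numbers
-- with markers), exactly as Python's IndexError/TypeError there is unreachable.
def checkLoop2 (x : Int) : Nat → Int → List Cell → Bool
  | 0, _, _ => true
  | k + 1, i, cl =>
    match PySem.List.pyGet? cl i with
    | some Cell.D =>
      match PySem.List.pyGet? cl (i + 1) with
      | some (Cell.num c) =>
        if c < x then false
        else checkLoop2 x k (i + 1) (PySem.List.pySetD cl (i + 1) (Cell.num (c - x)))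
      | _ => false
    | some Cell.U =>
      match PySem.List.pyGet? cl (i - 1) with
      | some (Cell.num c) =>
        if c < x then false
        else checkLoop2 x k (i + 1) (PySem.List.pySetD cl (i - 1) (Cell.num (c - x)))
      | _ => false
    | _ => checkLoop2 x k (i + 1) cl

def check (arr : List Int) (x : Int) : Bool :=
  match arr with
  | [] => false  -- Python: arr[0] raises IndexError; excluded by Pre_check
  | a :: rest =>
    match checkLoop1 rest a 1 [] with
    | none => false
    | some cl => checkLoop2 x cl.length 0 cl

-- ===== PORT B =====
-- B's single loop over i in range(1, len(arr)); c is the usable length of the current run.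
def altLoop (x : Int) : List Int → Int → Int → Bool
  | [], _, c => decide (0 ≤ c)
  | a :: rest, prev, c =>
    let d := a - prev
    if d = 0 then altLoop x rest a (c + 1)
    else if d = 1 then (if c < x then false else altLoop x rest a 1)
    else if d = -1 then (if c < 0 then false else altLoop x rest a (1 - x))
    else false

def check_alt (arr : List Int) (x : Int) : Bool :=
  match arr with
  | [] => true  -- B's loop body never runs: returns c >= 0 with c = 1
  | a :: rest => altLoop x rest a 1

-- ===== PRECONDITION & SPEC =====
-- Pre_check excludes only the empty list, on which A (arr[0]) raises IndexError.
def Pre_check (arr : List Int) (x : Int) : Prop := arr ≠ []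
instance (arr : List Int) (x : Int) : Decidable (Pre_check arr x) := by unfold Pre_check; infer_instance
def pvWitness_check : List Int × Int := ([2, 2, 1, 1, 2, 2], 2)

def Spec_check (arr : List Int) (x : Int) (out : Bool) : Prop := out = check_alt arr x
instance (arr : List Int) (x : Int) (out : Bool) : Decidable (Spec_check arr x out) := by unfold Spec_check; infer_instance

-- ===== CLAIM (what is proved, stated in full; the proofs are below) =====
def Claim_equal_check : Prop := ∀ (arr : List Int) (x : Int), Dom_check arr x → Pre_check arr x → Spec_check arr x (check arr x)

-- ===== LEMMAS AND PROOFS =====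

-- functional description of A's second loop: walk consecutive runs,
-- carrying the remaining length r of the current run
def go (x : Int) : Int → Int → List (Int × Int) → Bool
  | _, _, [] => true
  | h, r, (h2, c2) :: t =>
    if h2 - h < 0 then
      if c2 < x then false else go x h2 (c2 - x) t
    else
      if r < x then false else go x h2 c2 t

-- streaming description of B's loop over the run decomposition: the descent check is
-- deferred to the next boundary (or the end)
def goS (x : Int) : Int → Int → List (Int × Int) → Bool
  | r, _, [] => decide (0 ≤ r)
  | r, h, (h2, c2) :: t =>
    if h2 - h < 0 then
      if r < 0 then false else goS x (c2 - x) h2 t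
    else
      if r < x then false else goS x c2 h2 t

-- common functional description of both first passes (run-length decomposition)
def enc : List Int → Int → Int → Option (List (Int × Int))
  | [], h, c => some [(h, c)]
  | v :: rest, h, c =>
    if v = h then enc rest h (c + 1)
    else if (v - h).natAbs > 1 then none
    else (enc rest v 1).map ((h, c) :: ·)

-- cells of A's cntlist after the first run: marker then count, repeated
def tail2 : Int → List (Int × Int) → List Cell
  | _, [] => []
  | h, (h2, c2) :: t => (if h2 - h < 0 then Cell.D else Cell.U) :: Cell.num c2 :: tail2 h2 t

def toCells : List (Int × Int) → List Cell
  | [] => []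
  | (h, c) :: t => Cell.num c :: tail2 h t

theorem enc_head : ∀ (rest : List Int) (h c : Int) (t : List (Int × Int)),
    enc rest h c = some t → ∃ c' t', t = (h, c') :: t' := by
  intro rest
  induction rest with
  | nil => intro h c t ht; simp [enc] at ht; exact ⟨c, [], ht.symm⟩
  | cons v rest ih =>
    intro h c t ht
    simp only [enc] at ht
    split at ht
    · exact (‹v = h› ▸ ih h (c + 1) t ht)
    · split at ht
      · simp at ht
      · rcases Option.map_eq_some_iff.mp ht with ⟨t0, ht0, rfl⟩
        exact ⟨c, t0, rfl⟩

-- every count produced by enc is positive (head ≥ the running count, tail counts ≥ 1)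
theorem enc_cpos : ∀ (rest : List Int) (h c : Int) (t : List (Int × Int)),
    1 ≤ c → enc rest h c = some t → ∀ p ∈ t, 1 ≤ p.2 := by
  intro rest
  induction rest with
  | nil =>
    intro h c t hc ht p hp
    simp [enc] at ht
    rw [← ht] at hp; simp at hp; simp [hp, hc]
  | cons v rest ih =>
    intro h c t hc ht p hp
    simp only [enc] at ht
    split at ht
    · exact ih h (c + 1) t (by omega) ht p hp
    · split at ht
      · simp at ht
      · rcases Option.map_eq_some_iff.mp ht with ⟨t0, ht0, rfl⟩
        rcases List.mem_cons.mp hp with rfl | hp0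
        · simpa using hc
        · exact ih v 1 t0 le_rfl ht0 p hp0

theorem loop1_enc : ∀ (rest : List Int) (h c : Int) (cl : List Cell),
    checkLoop1 rest h c cl = (enc rest h c).map (fun t => cl ++ toCells t) := by
  intro rest
  induction rest with
  | nil => intro h c cl; simp [checkLoop1, enc, toCells, tail2]
  | cons v rest ih =>
    intro h c cl
    rw [checkLoop1, enc]
    by_cases hvh : v = h
    · rw [if_neg (by simp [hvh]), if_pos hvh, hvh]
      exact ih h (c + 1) cl
    · rw [if_pos (by simp [hvh]), if_neg hvh]
      by_cases habs : (v - h).natAbs > 1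
      · rw [if_pos habs, if_pos habs]; simp
      · rw [if_neg habs, if_neg habs, ih v 1 _]
        cases henc : enc rest v 1 with
        | none => simp
        | some t =>
          rcases enc_head rest v 1 t henc with ⟨cv, t', rfl⟩
          simp [toCells, tail2]

-- list surgery helper
theorem set_append_len {α : Type} : ∀ (pre : List α) (a b : α) (l : List α),
    (pre ++ a :: l).set pre.length b = pre ++ b :: l := by
  intro pre a b l
  induction pre with
  | nil => simp
  | cons p pre ih => simp [ih]

theorem loop2_go : ∀ (t : List (Int × Int)) (pre : List Cell) (h r x : Int),
    checkLoop2 x ((tail2 h t).length + 1) (pre.length : Int) (pre ++ Cell.num r :: tail2 h t)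
      = go x h r t := by
  intro t
  induction t with
  | nil =>
    intro pre h r x
    simp [tail2, checkLoop2, go]
  | cons p t ih =>
    rcases p with ⟨h2, c2⟩
    intro pre h r x
    have hlen : (tail2 h ((h2, c2) :: t)).length + 1 = ((tail2 h2 t).length + 1) + 1 + 1 := by
      simp [tail2]
    rw [hlen]
    rw [checkLoop2]
    rw [show (pre ++ Cell.num r :: tail2 h ((h2, c2) :: t))
        = pre ++ Cell.num r :: (if h2 - h < 0 then Cell.D else Cell.U) :: Cell.num c2 :: tail2 h2 t from by simp [tail2]]
    rw [PySem.List.pyGet?_append_length]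
    rw [checkLoop2]
    have e1 : ((pre.length : Int) + 1) = (((pre ++ [Cell.num r]).length : Int)) := by
      simp
    have hget1 : PySem.List.pyGet?
        (pre ++ Cell.num r :: (if h2 - h < 0 then Cell.D else Cell.U) :: Cell.num c2 :: tail2 h2 t)
        ((pre.length : Int) + 1) = some (if h2 - h < 0 then Cell.D else Cell.U) := by
      rw [e1, show pre ++ Cell.num r :: (if h2 - h < 0 then Cell.D else Cell.U) :: Cell.num c2 :: tail2 h2 t
          = (pre ++ [Cell.num r]) ++ (if h2 - h < 0 then Cell.D else Cell.U) :: Cell.num c2 :: tail2 h2 t from by simp,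
        PySem.List.pyGet?_append_length]
    rw [hget1]
    by_cases hdir : h2 - h < 0
    · rw [if_pos hdir]
      have hget2 : PySem.List.pyGet?
          (pre ++ Cell.num r :: Cell.D :: Cell.num c2 :: tail2 h2 t)
          (((pre.length : Int) + 1) + 1) = some (Cell.num c2) := by
        rw [show ((pre.length : Int) + 1) + 1 = (((pre ++ [Cell.num r, Cell.D]).length : Int)) from by simp; omega,
          show pre ++ Cell.num r :: Cell.D :: Cell.num c2 :: tail2 h2 t
            = (pre ++ [Cell.num r, Cell.D]) ++ Cell.num c2 :: tail2 h2 t from by simp,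
          PySem.List.pyGet?_append_length]
      simp only [hget2]
      by_cases hcx : c2 < x
      · simp [go, hdir, hcx]
      · rw [if_neg hcx]
        have hset : PySem.List.pySetD (pre ++ Cell.num r :: Cell.D :: Cell.num c2 :: tail2 h2 t)
            (((pre.length : Int) + 1) + 1) (Cell.num (c2 - x))
            = (pre ++ [Cell.num r, Cell.D]) ++ Cell.num (c2 - x) :: tail2 h2 t := by
          rw [show ((pre.length : Int) + 1) + 1 = (((pre ++ [Cell.num r, Cell.D]).length : Int)) from by simp; omega,
            show pre ++ Cell.num r :: Cell.D :: Cell.num c2 :: tail2 h2 t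
              = (pre ++ [Cell.num r, Cell.D]) ++ Cell.num c2 :: tail2 h2 t from by simp,
            PySem.List.pySetD_natCast, set_append_len]
        rw [hset]
        have := ih (pre ++ [Cell.num r, Cell.D]) h2 (c2 - x) x
        rw [show (((pre ++ [Cell.num r, Cell.D]).length : Int)) = ((pre.length : Int) + 1) + 1 from by simp; omega] at this
        rw [this]
        simp [go, hdir, hcx]
    · rw [if_neg hdir]
      have hget2 : PySem.List.pyGet?
          (pre ++ Cell.num r :: Cell.U :: Cell.num c2 :: tail2 h2 t)
          (((pre.length : Int) + 1) - 1) = some (Cell.num r) := by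
        rw [show ((pre.length : Int) + 1) - 1 = ((pre.length : Int)) from by omega,
          PySem.List.pyGet?_append_length]
      simp only [hget2]
      by_cases hrx : r < x
      · simp [go, hdir, hrx]
      · rw [if_neg hrx]
        have hset : PySem.List.pySetD (pre ++ Cell.num r :: Cell.U :: Cell.num c2 :: tail2 h2 t)
            (((pre.length : Int) + 1) - 1) (Cell.num (r - x))
            = (pre ++ [Cell.num (r - x), Cell.U]) ++ Cell.num c2 :: tail2 h2 t := by
          rw [show ((pre.length : Int) + 1) - 1 = ((pre.length : Int)) from by omega,
            PySem.List.pySetD_natCast, set_append_len]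
          simp
        rw [hset]
        have := ih (pre ++ [Cell.num (r - x), Cell.U]) h2 c2 x
        rw [show (((pre ++ [Cell.num (r - x), Cell.U]).length : Int)) = ((pre.length : Int) + 1) + 1 from by simp; omega] at this
        rw [this]
        simp [go, hdir, hrx]

-- a negative remaining length is never repaired: goS fails on it (x > 0)
theorem goS_neg : ∀ (t : List (Int × Int)) (h r x : Int), r < 0 → 0 < x →
    goS x r h t = false := by
  intro t h r x hr hx
  cases t with
  | nil => simp [goS]; omega
  | cons p t =>
    rcases p with ⟨h2, c2⟩
    by_cases hdir : h2 - h < 0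
    · simp [goS, hdir]; omega
    · simp [goS, hdir]; omega

-- with a nonnegative remaining length and positive run counts, the deferred descent
-- check of goS agrees with go's immediate one
theorem goS_go : ∀ (t : List (Int × Int)) (h r x : Int), 0 ≤ r → (∀ p ∈ t, 1 ≤ p.2) →
    goS x r h t = go x h r t := by
  intro t
  induction t with
  | nil => intro h r x hr _; simp [goS, go, hr]
  | cons p t ih =>
    rcases p with ⟨h2, c2⟩
    intro h r x hr hpos
    have hc2 : 1 ≤ c2 := hpos (h2, c2) (List.mem_cons_self)
    have hpos' : ∀ p ∈ t, 1 ≤ p.2 := fun p hp => hpos p (List.mem_cons_of_mem _ hp)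
    by_cases hdir : h2 - h < 0
    · rw [goS, go, if_pos hdir, if_pos hdir, if_neg (by omega)]
      by_cases hcx : c2 < x
      · rw [if_pos hcx]
        exact goS_neg t h2 (c2 - x) x (by omega) (by omega)
      · rw [if_neg hcx]
        exact ih h2 (c2 - x) x (by omega) hpos'
    · rw [goS, go, if_neg hdir, if_neg hdir]
      by_cases hrx : r < x
      · rw [if_pos hrx, if_pos hrx]
      · rw [if_neg hrx, if_neg hrx]
        exact ih h2 c2 x (by omega) hpos'

-- B's streaming loop computes goS over the run decomposition, with the constant offset δ
-- (0 after an ascent or at the start, -x after a descent) between c and the run count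
theorem altLoop_enc : ∀ (rest : List Int) (h c δ x : Int),
    altLoop x rest h (c + δ) =
      match enc rest h c with
      | none => false
      | some [] => true
      | some ((_, L) :: t) => goS x (L + δ) h t := by
  intro rest
  induction rest with
  | nil => intro h c δ x; simp [altLoop, enc, goS]
  | cons v rest ih =>
    intro h c δ x
    rw [altLoop, enc]
    by_cases hvh : v = h
    · rw [if_pos (by simp [hvh]), if_pos hvh]
      have : c + δ + 1 = (c + 1) + δ := by ring
      rw [this, hvh]
      exact ih h (c + 1) δ x
    · rw [if_neg (fun hd => hvh (by omega)), if_neg hvh]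
      by_cases habs : (v - h).natAbs > 1
      · rw [if_pos habs]
        have hne1 : ¬ (v - h = 1) := by omega
        have hnem1 : ¬ (v - h = -1) := by omega
        rw [if_neg hne1, if_neg hnem1]
      · rw [if_neg habs]
        have hd1 : v - h = 1 ∨ v - h = -1 := by omega
        cases henc : enc rest v 1 with
        | none =>
          have ihx : ∀ δ', altLoop x rest v (1 + δ') = false := by
            intro δ'
            have := ih v 1 δ' x
            rw [henc] at this; exact this
          rcases hd1 with hd | hd
          · rw [if_pos hd]
            by_cases hcx : c + δ < x
            · simp [hcx]
            · rw [if_neg hcx]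
              have := ihx 0
              simpa using this
          · rw [if_neg (by omega), if_pos hd]
            by_cases hc0 : c + δ < 0
            · simp [hc0]
            · rw [if_neg hc0]
              have := ihx (-x)
              rw [show (1 : Int) + -x = 1 - x from by ring] at this
              simp [this]
        | some t0 =>
          rcases enc_head rest v 1 t0 henc with ⟨L, t', rfl⟩
          have ihx : ∀ δ', altLoop x rest v (1 + δ') = goS x (L + δ') v t' := by
            intro δ'
            have := ih v 1 δ' x
            rw [henc] at this; exact this
          rcases hd1 with hd | hd
          · rw [if_pos hd]
            simp only [Option.map_some]
            rw [show goS x (c + δ) h ((v, L) :: t')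
                = if c + δ < x then false else goS x L v t' from by
              rw [goS, if_neg (by omega)]]
            by_cases hcx : c + δ < x
            · simp [hcx]
            · rw [if_neg hcx, if_neg hcx]
              have := ihx 0
              simpa using this
          · rw [if_neg (by omega), if_pos hd]
            simp only [Option.map_some]
            rw [show goS x (c + δ) h ((v, L) :: t')
                = if c + δ < 0 then false else goS x (L - x) v t' from by
              rw [goS, if_pos (by omega)]]
            by_cases hc0 : c + δ < 0
            · simp [hc0]
            · rw [if_neg hc0, if_neg hc0]
              have := ihx (-x)
              rw [show (1 : Int) + -x = 1 - x from by ring,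
                show L + -x = L - x from by ring] at this
              exact this

-- ===== VERDICT (by name: the statements are the Claim_ definitions above) =====
theorem check_spec : Claim_equal_check := by
  intro arr x _ hpre
  unfold Spec_check
  cases arr with
  | nil => exact absurd rfl hpre
  | cons a rest =>
    simp only [check, check_alt, loop1_enc]
    have halt := altLoop_enc rest a 1 0 x
    rw [show (1 : Int) + 0 = 1 from by ring] at halt
    cases henc : enc rest a 1 with
    | none => rw [henc] at halt; simp [halt]
    | some runs =>
      rcases enc_head rest a 1 runs henc with ⟨c', t, rfl⟩
      rw [henc] at halt
      have hpos := enc_cpos rest a 1 ((a, c') :: t) le_rfl henc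
      have hc' : 1 ≤ c' := hpos (a, c') (List.mem_cons_self)
      have hA : checkLoop2 x (toCells ((a, c') :: t)).length 0 (toCells ((a, c') :: t)) = go x a c' t := by
        have := loop2_go t ([] : List Cell) a c' x
        simpa [toCells] using this
      simp only [Option.map_some, List.nil_append]
      rw [hA, halt]
      show go x a c' t = goS x (c' + 0) a t
      rw [show c' + 0 = c' from by ring]
      rw [goS_go t a c' x (by omega) (fun p hp => hpos p (List.mem_cons_of_mem _ hp))]
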